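-- pv_equiv track=rewrite | github.com/UrranQx/WaterMeterCV | models/data/ocr_dataset.py | _split_value_text_parts
-- ===== SOURCE A (Python) =====
-- def _split_value_text_parts(value_text: str) -> tuple[str, str]:
--     """Split numeric text into integer/fraction digit parts.
--
--     Only digits are kept in each part; separator is normalized to ".".
--     """
--     text = str(value_text).strip().replace(",", ".")
--     if not text:
--         return "", ""
--
--     if "." in text:
--         int_part, frac_part = text.split(".", 1)
--     else:
--         int_part, frac_part = text, ""
--
--     int_digits = "".join(ch for ch in int_part if ch.isdigit())
--     frac_digits = "".join(ch for ch in frac_part if ch.isdigit())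
--     if not int_digits and frac_digits:
--         int_digits = "0"
--     return int_digits, frac_digits
-- ===== SOURCE B (Python) =====
-- def _split_value_text_parts(value_text: str) -> tuple[str, str]:
--     """Single pass: walk the normalized text once, routing digits before the
--     first separator to the integer part and digits after it to the fraction part."""
--     text = str(value_text).strip().replace(",", ".")
--     seen_sep = False
--     int_digits = ""
--     frac_digits = ""
--     for ch in text:
--         if not seen_sep:
--             if ch == ".":
--                 seen_sep = True
--             elif ch.isdigit():
--                 int_digits += ch
--         elif ch.isdigit():
--             frac_digits += ch
--     if not int_digits and frac_digits:
--         int_digits = "0"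
--     return int_digits, frac_digits
-- ===== Notes on version B (the rewrite author's own statement) =====
-- stated objective: alternative
-- what changed: Replaces A's contains-check + maxsplit-1 split + two separate digit-filter passes by one left-to-right pass over the normalized text with a seen-separator flag routing digits into the two accumulators.
import Mathlib
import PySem

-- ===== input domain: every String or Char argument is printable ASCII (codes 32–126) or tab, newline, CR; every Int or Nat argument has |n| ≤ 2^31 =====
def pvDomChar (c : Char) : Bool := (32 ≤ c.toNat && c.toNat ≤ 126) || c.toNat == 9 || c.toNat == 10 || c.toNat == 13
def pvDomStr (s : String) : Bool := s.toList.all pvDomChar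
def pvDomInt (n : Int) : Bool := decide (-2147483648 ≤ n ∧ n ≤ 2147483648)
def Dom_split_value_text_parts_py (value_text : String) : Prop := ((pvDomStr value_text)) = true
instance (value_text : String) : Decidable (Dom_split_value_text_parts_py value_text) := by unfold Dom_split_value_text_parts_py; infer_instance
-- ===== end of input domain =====

-- B replaces A's contains/split/two-filters pipeline by a single left-to-right pass with a
-- seen-separator flag (objective: alternative decomposition, same cost).

-- ===== PORT A =====
def split_value_text_parts_py (value_text : String) : String × String :=
  let text := PySem.Chars.replace (PySem.Chars.strip value_text.toList) [','] ['.']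
  if text.isEmpty then ("", "")
  else
    let parts :=
      if PySem.Chars.isIn ['.'] text then PySem.Chars.splitOnMax text ['.'] 1
      else [text, []]
    let int_part := parts.headD []
    let frac_part := (parts.drop 1).headD []
    let int_digits := int_part.filter PySem.Chars.isdigit
    let frac_digits := frac_part.filter PySem.Chars.isdigit
    let int_digits' := if int_digits.isEmpty && !frac_digits.isEmpty then ['0'] else int_digits
    (String.ofList int_digits', String.ofList frac_digits)

-- ===== PORT B =====
def pvAltStep (st : Bool × List Char × List Char) (c : Char) : Bool × List Char × List Char :=
  if !st.1 then
    if c = '.' then (true, st.2.1, st.2.2)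
    else if PySem.Chars.isdigit c then (st.1, st.2.1 ++ [c], st.2.2)
    else st
  else if PySem.Chars.isdigit c then (st.1, st.2.1, st.2.2 ++ [c]) else st

def split_value_text_parts_py_alt (value_text : String) : String × String :=
  let text := PySem.Chars.replace (PySem.Chars.strip value_text.toList) [','] ['.']
  let r := text.foldl pvAltStep (false, [], [])
  let ints := if r.2.1 = [] ∧ r.2.2 ≠ [] then ['0'] else r.2.1
  (String.ofList ints, String.ofList r.2.2)

-- ===== PRECONDITION & SPEC =====
def Spec_split_value_text_parts_py (value_text : String) (out : String × String) : Prop := out = split_value_text_parts_py_alt value_text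
instance (value_text : String) (out : String × String) : Decidable (Spec_split_value_text_parts_py value_text out) := by unfold Spec_split_value_text_parts_py; infer_instance

-- ===== CLAIM (what is proved, stated in full; the proofs are below) =====
def Claim_equal_split_value_text_parts_py : Prop := ∀ (value_text : String), Dom_split_value_text_parts_py value_text → Spec_split_value_text_parts_py value_text (split_value_text_parts_py value_text)

-- ===== LEMMAS AND PROOFS =====

-- B's fold before the first separator: digits accumulate into the integer part.
theorem pvAlt_foldl_no_dot (p : List Char) (h : '.' ∉ p) (i f : List Char) :
    p.foldl pvAltStep (false, i, f) = (false, i ++ p.filter PySem.Chars.isdigit, f) := by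
  induction p generalizing i with
  | nil => simp
  | cons c rest ih =>
    have hc : c ≠ '.' := fun hc => h (hc ▸ List.mem_cons_self)
    have hr : '.' ∉ rest := fun hm => h (List.mem_cons_of_mem _ hm)
    by_cases hd : PySem.Chars.isdigit c
    · simp [pvAltStep, hc, hd, ih hr]
    · simp [pvAltStep, hc, hd, ih hr]

-- B's fold after the first separator: digits accumulate into the fraction part.
theorem pvAlt_foldl_after_dot (q : List Char) (i f : List Char) :
    q.foldl pvAltStep (true, i, f) = (true, i, f ++ q.filter PySem.Chars.isdigit) := by
  induction q generalizing f with
  | nil => simp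
  | cons c rest ih =>
    by_cases hd : PySem.Chars.isdigit c
    · simp [pvAltStep, hd, ih]
    · simp [pvAltStep, hd, ih]

theorem pv_go_zero (fuel : Nat) (q cur : List Char) (acc : List (List Char)) :
    PySem.Chars.splitOnMax.go ['.'] fuel 0 q cur acc = ((cur.reverse ++ q) :: acc).reverse := by
  cases fuel with
  | zero => simp [PySem.Chars.splitOnMax.go]
  | succ n => cases q <;> simp [PySem.Chars.splitOnMax.go]

theorem pv_go_skip (p : List Char) (h : '.' ∉ p) (fuel m : Nat) (hm : m ≠ 0)
    (hf : p.length < fuel) (q cur : List Char) (acc : List (List Char)) :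
    PySem.Chars.splitOnMax.go ['.'] fuel m (p ++ q) cur acc =
      PySem.Chars.splitOnMax.go ['.'] (fuel - p.length) m q (p.reverse ++ cur) acc := by
  induction p generalizing fuel cur with
  | nil => simp
  | cons c rest ih =>
    cases fuel with
    | zero => omega
    | succ n =>
      have hc : c ≠ '.' := fun hc => h (hc ▸ List.mem_cons_self)
      have hr : '.' ∉ rest := fun hm => h (List.mem_cons_of_mem _ hm)
      have hpre : ['.'].isPrefixOf (c :: (rest ++ q)) = false := by
        simp [List.isPrefixOf, Ne.symm hc]
      rw [List.cons_append]
      rw [show PySem.Chars.splitOnMax.go ['.'] (n+1) m (c :: (rest ++ q)) cur acc =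
            PySem.Chars.splitOnMax.go ['.'] n m (rest ++ q) (c :: cur) acc by
        simp [PySem.Chars.splitOnMax.go, hm, hpre]]
      rw [ih hr n (by simpa using hf)]
      simp

-- A's split(".", 1) at the first dot.
theorem pv_splitOnMax_first_dot (p q : List Char) (h : '.' ∉ p) :
    PySem.Chars.splitOnMax (p ++ '.' :: q) ['.'] 1 = [p, q] := by
  unfold PySem.Chars.splitOnMax
  rw [if_neg (by norm_num)]
  rw [show (Int.toNat 1) = 1 from rfl]
  rw [pv_go_skip p h _ 1 (by omega) (by simp)]
  have hlen : p.length + ('.' :: q).length + 1 - p.length = q.length + 2 := by simp; omega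
  simp only [List.length_append, hlen]
  rw [show PySem.Chars.splitOnMax.go ['.'] (q.length + 2) 1 ('.' :: q) (p.reverse ++ []) [] =
        PySem.Chars.splitOnMax.go ['.'] (q.length + 1) 0 q [] [(p.reverse ++ []).reverse] by
    simp [PySem.Chars.splitOnMax.go, List.isPrefixOf]]
  rw [pv_go_zero]
  simp

theorem pv_first_dot_split (t : List Char) (h : '.' ∈ t) :
    ∃ p q, t = p ++ '.' :: q ∧ '.' ∉ p := by
  induction t with
  | nil => cases h
  | cons c rest ih =>
    by_cases hc : c = '.'
    · exact ⟨[], rest, by simp [hc], by simp⟩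
    · obtain ⟨p, q, hpq, hnp⟩ := ih (by
        rcases List.mem_cons.mp h with h1 | h1
        · exact absurd h1.symm hc
        · exact h1)
      exact ⟨c :: p, q, by simp [hpq], by simp [Ne.symm hc, hnp]⟩

-- ===== VERDICT (by name: the statement is the Claim_ definition above) =====
theorem split_value_text_parts_py_spec : Claim_equal_split_value_text_parts_py := by
  intro s _
  unfold Spec_split_value_text_parts_py split_value_text_parts_py split_value_text_parts_py_alt
  set t := PySem.Chars.replace (PySem.Chars.strip s.toList) [','] ['.'] with ht
  by_cases hdot : '.' ∈ t
  · obtain ⟨p, q, hpq, hnp⟩ := pv_first_dot_split t hdot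
    have hne : t.isEmpty = false := by rw [hpq]; cases p <;> simp
    have hin : PySem.Chars.isIn ['.'] t = true := by
      rw [PySem.Chars.isIn_iff_infix]
      exact (List.singleton_infix_iff _ _).mpr hdot
    have hfold : t.foldl pvAltStep (false, [], []) =
        (true, p.filter PySem.Chars.isdigit, q.filter PySem.Chars.isdigit) := by
      rw [hpq, List.foldl_append, pvAlt_foldl_no_dot p hnp]
      simp only [List.foldl_cons]
      rw [show pvAltStep (false, [] ++ p.filter PySem.Chars.isdigit, []) '.' =
            (true, p.filter PySem.Chars.isdigit, []) by simp [pvAltStep]]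
      rw [pvAlt_foldl_after_dot]
      simp
    simp only [hne, hin, hfold, Bool.false_eq_true, if_false, if_true]
    simp only [hpq, pv_splitOnMax_first_dot p q hnp]
    simp [List.isEmpty_iff]
  · have hin : PySem.Chars.isIn ['.'] t = false := by
      rw [← Bool.not_eq_true, PySem.Chars.isIn_iff_infix]
      exact fun h => hdot ((List.singleton_infix_iff _ _).mp h)
    have hfold : t.foldl pvAltStep (false, [], []) =
        (false, t.filter PySem.Chars.isdigit, []) := by
      simpa using pvAlt_foldl_no_dot t hdot [] []
    rcases eq_or_ne t [] with h0 | h0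
    · simp [h0]
    · have hne : t.isEmpty = false := by simpa [List.isEmpty_iff] using h0
      simp [hne, hin, hfold]
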